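-- pv_equiv track=rewrite | github.com/QwQ-maker/4box | NewWork/main_enhanced.py | sac_property
-- ===== SOURCE A (Python) =====
-- def sbox_to_component_truth_tables(sbox, n_bits):
--     """拆分S盒为各个分量的真值表"""
--     size = 1 << n_bits
--     components = []
--     for bit in range(n_bits):
--         tt = [(sbox[x] >> (n_bits - 1 - bit)) & 1 for x in range(size)]
--         components.append(tt)
--     return components
--
-- def sac_property(sbox, n_bits):
--     """严格雪崩准则"""
--     size = 1 << n_bits
--     components = sbox_to_component_truth_tables(sbox, n_bits)
--     distances = []
--     for tt in components:
--         max_dist = 0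
--         for bit in range(n_bits):
--             dist = abs(sum(1 for x in range(size) if tt[x] ^ tt[x ^ (1 << bit)]) - (size >> 1))
--             max_dist = max(max_dist, dist)
--         distances.append(max_dist)
--     return distances
-- ===== SOURCE B (Python) =====
-- def sac_property(sbox, n_bits):
--     size = 1 << n_bits
--     half = size >> 1
--     cols = []  # cols[bit][comp] = number of x whose comp-th output bit flips under input-bit `bit`
--     for bit in range(n_bits):
--         col = [0] * n_bits
--         for x in range(size):
--             d = sbox[x] ^ sbox[x ^ (1 << bit)]
--             col = [col[comp] + ((d >> (n_bits - 1 - comp)) & 1) for comp in range(n_bits)]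
--         cols.append(col)
--     return [max(abs(col[comp] - half) for col in cols) for comp in range(n_bits)]
-- ===== Notes on version B (the rewrite author's own statement) =====
-- stated objective: alternative
-- what changed: Instead of materialising one truth table per output component and re-counting flips per (component, bit) pair, B keeps a counts matrix: for each input bit it XORs the two full S-box words once per x, accumulates per-component flip counts in one pass, and takes the max of |count - size/2| per component at the end.
import Mathlib
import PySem

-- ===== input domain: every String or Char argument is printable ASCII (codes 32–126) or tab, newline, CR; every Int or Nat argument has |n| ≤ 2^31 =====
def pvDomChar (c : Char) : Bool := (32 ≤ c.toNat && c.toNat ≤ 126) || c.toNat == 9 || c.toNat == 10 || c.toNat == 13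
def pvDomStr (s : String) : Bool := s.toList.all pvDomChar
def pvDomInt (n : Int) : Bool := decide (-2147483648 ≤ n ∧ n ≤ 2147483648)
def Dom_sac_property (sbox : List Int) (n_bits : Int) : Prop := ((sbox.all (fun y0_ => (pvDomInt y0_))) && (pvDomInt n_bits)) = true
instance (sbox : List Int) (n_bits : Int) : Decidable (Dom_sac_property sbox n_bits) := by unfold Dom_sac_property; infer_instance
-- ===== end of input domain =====

-- B replaces A's per-component truth tables by a counts matrix filled from one full-word XOR per (input-bit, x); same results, a different decomposition (no speed claim).


-- ===== PORT A =====
-- sbox[x] would raise IndexError when x ≥ len(sbox); Pre_ excludes that, so the getD default is never reached inside Pre_.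
def sbox_to_component_truth_tables (sbox : List Int) (n_bits : Int) : List (List Int) :=
  let size := 2 ^ n_bits.toNat
  (List.range n_bits.toNat).map (fun bit =>
    (List.range size).map (fun x =>
      PySem.Int.band ((sbox.getD x 0) >>> (n_bits.toNat - 1 - bit)) 1))

def sac_property (sbox : List Int) (n_bits : Int) : List Int :=
  let size := 2 ^ n_bits.toNat
  let components := sbox_to_component_truth_tables sbox n_bits
  components.map (fun tt =>
    (List.range n_bits.toNat).foldl (fun max_dist bit =>
      let dist : Int := |((((List.range size).filter (fun x =>
          PySem.Int.bxor (tt.getD x 0) (tt.getD (x ^^^ (1 <<< bit)) 0) != 0)).length : Int))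
          - ((size >>> 1 : Nat) : Int)|
      max max_dist dist) 0)

-- ===== PORT B =====
def sac_property_alt (sbox : List Int) (n_bits : Int) : List Int :=
  let n := n_bits.toNat
  let size := 2 ^ n
  let half : Int := ((size >>> 1 : Nat) : Int)
  let cols := (List.range n).map (fun bit =>
    (List.range size).foldl (fun col x =>
      let d := PySem.Int.bxor (sbox.getD x 0) (sbox.getD (x ^^^ (1 <<< bit)) 0)
      (List.range n).map (fun comp => col.getD comp 0 + PySem.Int.band (d >>> (n - 1 - comp)) 1))
      (List.replicate n (0 : Int)))
  (List.range n).map (fun comp =>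
    (PySem.List.max? (cols.map (fun col => |col.getD comp 0 - half|)) (fun y => y)).getD 0)

-- ===== PRECONDITION & SPEC =====
-- Python A raises ValueError when n_bits < 0 (1 << n_bits) and IndexError when len(sbox) < 2^n_bits (except n_bits = 0, where sbox is never indexed); Pre_ excludes exactly those raising inputs.
def Pre_sac_property (sbox : List Int) (n_bits : Int) : Prop :=
  0 ≤ n_bits ∧ (n_bits = 0 ∨ 2 ^ n_bits.toNat ≤ sbox.length)
instance (sbox : List Int) (n_bits : Int) : Decidable (Pre_sac_property sbox n_bits) := by unfold Pre_sac_property; infer_instance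
def pvWitness_sac_property : List Int × Int := ([3, 0, 2, 1], 2)

def Spec_sac_property (sbox : List Int) (n_bits : Int) (out : List Int) : Prop := out = sac_property_alt sbox n_bits
instance (sbox : List Int) (n_bits : Int) (out : List Int) : Decidable (Spec_sac_property sbox n_bits out) := by unfold Spec_sac_property; infer_instance

-- ===== CLAIM (what is proved, stated in full; the proofs are below) =====
def Claim_equal_sac_property : Prop := ∀ (sbox : List Int) (n_bits : Int), Dom_sac_property sbox n_bits → Pre_sac_property sbox n_bits → Spec_sac_property sbox n_bits (sac_property sbox n_bits)

-- ===== LEMMAS AND PROOFS =====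

theorem bxor_ns (m k : Nat) : PySem.Int.bxor (↑m) (Int.negSucc k) = Int.negSucc (m ^^^ k) := by
  simp [PySem.Int.bxor, Int.negSucc_eq]
  rw [if_neg (by omega)]
  omega

theorem bxor_sn (m k : Nat) : PySem.Int.bxor (Int.negSucc m) (↑k) = Int.negSucc (m ^^^ k) := by
  simp [PySem.Int.bxor, Int.negSucc_eq]
  rw [if_neg (by omega)]
  omega

theorem bxor_ss (m k : Nat) : PySem.Int.bxor (Int.negSucc m) (Int.negSucc k) = ↑(m ^^^ k) := by
  simp [PySem.Int.bxor, Int.negSucc_eq]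
  omega

theorem sr_n (m : Nat) (k : Nat) : (↑m : Int) >>> k = ↑(m >>> k) := rfl
theorem sr_s (m : Nat) (k : Nat) : (Int.negSucc m) >>> k = Int.negSucc (m >>> k) := rfl

theorem bxor_shiftRight (a b : Int) (k : Nat) :
    (PySem.Int.bxor a b) >>> k = PySem.Int.bxor (a >>> k) (b >>> k) := by
  cases a <;> cases b <;> rename_i m j <;> (try simp only [Int.ofNat_eq_natCast])
  · rw [PySem.Int.bxor_natCast, sr_n, sr_n, sr_n, PySem.Int.bxor_natCast,
      Nat.shiftRight_xor_distrib]
  · rw [bxor_ns, sr_n, sr_s, sr_s, bxor_ns, Nat.shiftRight_xor_distrib]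
  · rw [bxor_sn, sr_s, sr_s, sr_n, bxor_sn, Nat.shiftRight_xor_distrib]
  · rw [bxor_ss, sr_s, sr_s, sr_n, bxor_ss, Nat.shiftRight_xor_distrib]

theorem parity (a b : Int) :
    PySem.Int.band (PySem.Int.bxor a b) 1 = if PySem.Int.band a 1 = PySem.Int.band b 1 then 0 else 1 := by
  have hx : ∀ m k : Nat, (m ^^^ k) % 2 = (m % 2) ^^^ (k % 2) := by
    intro m k
    rw [← Nat.and_one_is_mod, ← Nat.and_one_is_mod, ← Nat.and_one_is_mod, Nat.and_xor_distrib_right]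
  have hemod : ∀ v : Int, PySem.Int.band v 1 = v % 2 := by
    intro v
    rw [PySem.Int.band_one, PySem.Int.mod_eq_emod_of_pos (by omega : (0:Int) < 2)]
  cases a <;> cases b <;> rename_i m k <;> (try simp only [Int.ofNat_eq_natCast]) <;>
    [rw [PySem.Int.bxor_natCast]; rw [bxor_ns]; rw [bxor_sn]; rw [bxor_ss]] <;>
    simp only [hemod, Int.negSucc_eq] <;>
    · have h1 := hx m k
      rcases Nat.mod_two_eq_zero_or_one m with hm | hm <;>
        rcases Nat.mod_two_eq_zero_or_one k with hk | hk <;>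
        · rw [hm, hk] at h1
          simp only [Nat.xor_self, Nat.zero_xor, Nat.xor_zero] at h1
          split_ifs with h <;> omega

theorem band_shift_bxor (a b : Int) (k : Nat) :
    PySem.Int.band ((PySem.Int.bxor a b) >>> k) 1 =
      if PySem.Int.band (a >>> k) 1 = PySem.Int.band (b >>> k) 1 then 0 else 1 := by
  rw [bxor_shiftRight]; exact parity _ _

theorem band_one_cases (v : Int) : PySem.Int.band v 1 = 0 ∨ PySem.Int.band v 1 = 1 := by
  rw [PySem.Int.band_one]
  have h1 := PySem.Int.mod_nonneg v (b := 2) (by omega)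
  have h2 := PySem.Int.mod_lt v (b := 2) (by omega)
  omega

theorem getD_map_range {f : Nat → Int} {n c : Nat} (h : c < n) :
    ((List.range n).map f).getD c 0 = f c := by
  simp [List.getD_eq_getElem?_getD, h]

theorem foldl_col (n : Nat) (g : Nat → Nat → Int) (xs : List Nat) :
    ∀ (col : List Int) (c : Nat), c < n →
      (xs.foldl (fun col x => (List.range n).map (fun comp => col.getD comp 0 + g x comp)) col).getD c 0
        = col.getD c 0 + (xs.map (fun x => g x c)).sum := by
  induction xs with
  | nil => intro col c _; simp
  | cons x xs ih =>
      intro col c hc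
      rw [List.foldl_cons, ih _ c hc, getD_map_range hc]
      simp; ring

theorem sum_ite_eq_length_filter (p : Nat → Bool) (xs : List Nat) :
    (xs.map (fun x => if p x then (1 : Int) else 0)).sum = ((xs.filter p).length : Int) := by
  induction xs with
  | nil => simp
  | cons x xs ih =>
      by_cases h : p x <;> simp [h, ih] <;> push_cast <;> ring

theorem max?_getD_nonneg (l : List Int) (h : ∀ a ∈ l, 0 ≤ a) :
    (PySem.List.max? l (fun y => y)).getD 0 = l.foldl max 0 := by
  cases l with
  | nil => rfl
  | cons a t =>
      rw [PySem.List.max?_id_cons, List.foldl_cons, max_eq_right (h a (by simp))]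
      rfl

theorem ports_eq (sbox : List Int) (n_bits : Int) :
    sac_property sbox n_bits = sac_property_alt sbox n_bits := by
  simp only [sac_property, sac_property_alt, sbox_to_component_truth_tables, List.map_map]
  apply List.map_congr_left
  intro i hi
  have hin : i < n_bits.toNat := List.mem_range.mp hi
  simp only [Function.comp_def]
  set n := n_bits.toNat with hn
  have hlt : ∀ b x : Nat, b < n → x < 2 ^ n → x ^^^ 1 <<< b < 2 ^ n := by
    intro b x hb hx
    have h2 : 1 <<< b < 2 ^ n := by
      rw [Nat.one_shiftLeft]
      exact Nat.pow_lt_pow_right (by omega) hb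
    exact Nat.xor_lt_two_pow hx h2
  have hA : ∀ b ∈ List.range n,
      List.filter (fun x =>
          PySem.Int.bxor
            (((List.range (2 ^ n)).map (fun x => PySem.Int.band (sbox.getD x 0 >>> (n - 1 - i)) 1)).getD x 0)
            (((List.range (2 ^ n)).map (fun x => PySem.Int.band (sbox.getD x 0 >>> (n - 1 - i)) 1)).getD (x ^^^ 1 <<< b) 0) != 0)
        (List.range (2 ^ n))
      = List.filter (fun x =>
          PySem.Int.band (sbox.getD x 0 >>> (n - 1 - i)) 1 !=
            PySem.Int.band (sbox.getD (x ^^^ 1 <<< b) 0 >>> (n - 1 - i)) 1) (List.range (2 ^ n)) := by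
    intro b hb
    apply List.filter_congr
    intro x hx
    have hx1 : x < 2 ^ n := List.mem_range.mp hx
    have hx2 : x ^^^ 1 <<< b < 2 ^ n := hlt b x (List.mem_range.mp hb) hx1
    rw [getD_map_range hx1, getD_map_range hx2]
    rcases band_one_cases (sbox.getD x 0 >>> (n - 1 - i)) with h1 | h1 <;>
      rcases band_one_cases (sbox.getD (x ^^^ 1 <<< b) 0 >>> (n - 1 - i)) with h2 | h2 <;>
      rw [h1, h2] <;> decide
  have hB : ∀ b ∈ List.range n,
      ((List.range (2 ^ n)).foldl (fun (col : List Int) (x : Nat) =>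
          (List.range n).map (fun comp =>
            col.getD comp 0 +
              PySem.Int.band
                (PySem.Int.bxor (sbox.getD x 0) (sbox.getD (x ^^^ 1 <<< b) 0) >>> (n - 1 - comp)) 1))
          (List.replicate n (0 : Int))).getD i 0
        = (((List.range (2 ^ n)).filter (fun x =>
            PySem.Int.band (sbox.getD x 0 >>> (n - 1 - i)) 1 !=
              PySem.Int.band (sbox.getD (x ^^^ 1 <<< b) 0 >>> (n - 1 - i)) 1)).length : Int) := by
    intro b hb
    rw [foldl_col n
      (fun x comp => PySem.Int.band
        (PySem.Int.bxor (sbox.getD x 0) (sbox.getD (x ^^^ 1 <<< b) 0) >>> (n - 1 - comp)) 1)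
      (List.range (2 ^ n)) (List.replicate n (0 : Int)) i hin]
    rw [List.getD_replicate _ hin, ← sum_ite_eq_length_filter]
    rw [zero_add]
    apply congrArg
    apply List.map_congr_left
    intro x hx
    rw [band_shift_bxor]
    by_cases h : PySem.Int.band (sbox.getD x 0 >>> (n - 1 - i)) 1 =
        PySem.Int.band (sbox.getD (x ^^^ 1 <<< b) 0 >>> (n - 1 - i)) 1 <;> simp [h]
  have hmap : (List.range n).map (fun b =>
      |((List.range (2 ^ n)).foldl (fun (col : List Int) (x : Nat) =>
          (List.range n).map (fun comp =>
            col.getD comp 0 +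
              PySem.Int.band
                (PySem.Int.bxor (sbox.getD x 0) (sbox.getD (x ^^^ 1 <<< b) 0) >>> (n - 1 - comp)) 1))
          (List.replicate n (0 : Int))).getD i 0 - ((2 ^ n >>> 1 : Nat) : Int)|)
      = (List.range n).map (fun b =>
      |((((List.range (2 ^ n)).filter (fun x =>
            PySem.Int.band (sbox.getD x 0 >>> (n - 1 - i)) 1 !=
              PySem.Int.band (sbox.getD (x ^^^ 1 <<< b) 0 >>> (n - 1 - i)) 1)).length : Int))
          - ((2 ^ n >>> 1 : Nat) : Int)|) :=
    List.map_congr_left (fun b hb => by rw [hB b hb])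
  rw [hmap]
  rw [max?_getD_nonneg _ (by
    intro a ha
    obtain ⟨b, _, rfl⟩ := List.mem_map.mp ha
    exact abs_nonneg _)]
  rw [List.foldl_map]
  apply PySem.List.foldl_congr_mem
  intro acc b hb
  rw [hA b hb]

-- ===== VERDICT (by name: the statement is the Claim_ definition above) =====
theorem sac_property_spec : Claim_equal_sac_property := by
  intro sbox n_bits _ _
  exact ports_eq sbox n_bits
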